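-- pv_equiv track=rewrite | github.com/BH1SCW/Leetcode-1 | HuaHua/contest/12/4.py | minimumMoves2
-- ===== SOURCE A (Python) =====
-- from typing import List
--
-- def minimumMoves2(arr: List[int]) -> int:
--     memo = {}
--     def dfs(k, l):
--         if (k, l) in memo:
--             return memo[k, l]
--         if k == l:
--             return 1
--         if k > l:
--             return 0
--         ans = l - k + 1
--         ans = min(ans, dfs(k + 1, l) + 1)
--         if arr[k] == arr[k + 1]:
--             ans = min(ans, dfs(k + 2, l) + 1)
--         for i in range(k + 2, l + 1):
--             if arr[i] == arr[k]:
--                 ans = min(ans, dfs(k + 1, i - 1) + dfs(i + 1, l))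
--         memo[k, l] = ans
--         return ans
--     return dfs(0, len(arr) - 1)
-- ===== SOURCE B (Python) =====
-- from typing import List
--
-- def minimumMoves2(arr: List[int]) -> int:
--     # Bottom-up iterative interval DP over increasing interval length.
--     n = len(arr)
--     dp = {}
--
--     def get(k, l):
--         return dp.get((k, l), 1 if k == l else 0)
--
--     for t in range(2, n + 1):
--         for k in range(0, n - t + 1):
--             l = k + t - 1
--             best = t
--             best = min(best, get(k + 1, l) + 1)
--             if arr[k] == arr[k + 1]:
--                 best = min(best, get(k + 2, l) + 1)
--             for i in range(k + 2, l + 1):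
--                 if arr[i] == arr[k]:
--                     best = min(best, get(k + 1, i - 1) + get(i + 1, l))
--             dp[(k, l)] = best
--     return get(0, n - 1)
-- ===== Notes on version B (the rewrite author's own statement) =====
-- stated objective: alternative
-- what changed: Replaced A's memoized top-down recursion (dfs with a memo dict) by an iterative bottom-up interval DP that fills a table over increasing interval lengths with the same three transitions.
import Mathlib
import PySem

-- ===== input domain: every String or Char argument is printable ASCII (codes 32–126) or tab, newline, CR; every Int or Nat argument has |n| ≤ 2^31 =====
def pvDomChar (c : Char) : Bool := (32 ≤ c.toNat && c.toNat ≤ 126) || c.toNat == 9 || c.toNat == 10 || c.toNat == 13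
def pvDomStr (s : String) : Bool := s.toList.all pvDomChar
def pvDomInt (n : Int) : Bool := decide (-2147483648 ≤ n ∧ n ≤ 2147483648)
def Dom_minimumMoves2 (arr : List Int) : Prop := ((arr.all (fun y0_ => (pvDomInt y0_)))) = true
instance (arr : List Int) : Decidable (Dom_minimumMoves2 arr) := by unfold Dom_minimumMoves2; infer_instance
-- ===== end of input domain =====

-- B replaces A's memoized top-down recursion by a bottom-up iterative interval-DP table (same transitions, different decomposition; not claimed faster).

-- ===== PORT A =====
-- arr[i]: every read the Python performs is in range, where pyGetD is exact.
def mm2Idx (arr : List Int) (i : Int) : Int := PySem.List.pyGetD arr i 0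

-- dfs of A, ported without the memo dict (the memo is a pure cache and never changes the
-- returned value); the fuel argument only makes the recursion structural and is always sufficient.
def mm2Dfs (arr : List Int) : Nat → Int → Int → Int
  | 0, _, _ => 0
  | fuel + 1, k, l =>
    if k = l then 1
    else if k > l then 0
    else
      let ans := l - k + 1
      let ans := min ans (mm2Dfs arr fuel (k + 1) l + 1)
      let ans := if mm2Idx arr k = mm2Idx arr (k + 1) then
                   min ans (mm2Dfs arr fuel (k + 2) l + 1) else ans
      (PySem.List.pyRange (k + 2) (l + 1) 1).foldl
        (fun ans i =>
          if mm2Idx arr i = mm2Idx arr k then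
            min ans (mm2Dfs arr fuel (k + 1) (i - 1) + mm2Dfs arr fuel (i + 1) l)
          else ans) ans

def minimumMoves2 (arr : List Int) : Int :=
  mm2Dfs arr arr.length 0 ((arr.length : Int) - 1)

-- ===== PORT B =====
-- arr[i]: every read B performs is in range, where pyGetD is exact.
def mm2At (arr : List Int) (i : Int) : Int := PySem.List.pyGetD arr i 0

-- dp.get((k, l), 1 if k == l else 0)
def mm2Get (dp : PySem.Dict (Int × Int) Int) (k l : Int) : Int :=
  dp.getD (k, l) (if k = l then 1 else 0)

def minimumMoves2_alt (arr : List Int) : Int :=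
  let n : Int := arr.length
  let dp :=
    (PySem.List.pyRange 2 (n + 1) 1).foldl (fun dp t =>
      (PySem.List.pyRange 0 (n - t + 1) 1).foldl (fun dp k =>
        let l := k + t - 1
        let best := t
        let best := min best (mm2Get dp (k + 1) l + 1)
        let best := if mm2At arr k = mm2At arr (k + 1) then
                      min best (mm2Get dp (k + 2) l + 1) else best
        let best := (PySem.List.pyRange (k + 2) (l + 1) 1).foldl
          (fun best i =>
            if mm2At arr i = mm2At arr k then
              min best (mm2Get dp (k + 1) (i - 1) + mm2Get dp (i + 1) l)
            else best) best
        dp.insert (k, l) best) dp)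
      PySem.Dict.empty
  mm2Get dp 0 (n - 1)

-- ===== PRECONDITION & SPEC =====
def Spec_minimumMoves2 (arr : List Int) (out : Int) : Prop := out = minimumMoves2_alt arr
instance (arr : List Int) (out : Int) : Decidable (Spec_minimumMoves2 arr out) := by unfold Spec_minimumMoves2; infer_instance

-- ===== CLAIM (what is proved, stated in full; the proofs are below) =====
def Claim_equal_minimumMoves2 : Prop := ∀ (arr : List Int), Dom_minimumMoves2 arr → Spec_minimumMoves2 arr (minimumMoves2 arr)

-- ===== LEMMAS AND PROOFS =====

-- the canonical value of A's dfs(k, l) (fuel chosen just large enough)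
def mm2D (arr : List Int) (k l : Int) : Int := mm2Dfs arr ((l - k).toNat + 1) k l

theorem mm2Dfs_fuel (arr : List Int) :
    ∀ f1 f2 : Nat, ∀ k l : Int, l - k < (f1 : Int) → l - k < (f2 : Int) →
      mm2Dfs arr f1 k l = mm2Dfs arr f2 k l := by
  intro f1
  induction f1 with
  | zero =>
    intro f2 k l h1 h2
    cases f2 with
    | zero => rfl
    | succ f2 =>
      have hkl : k > l := by omega
      simp [mm2Dfs]
      omega
  | succ f1 ih =>
    intro f2 k l h1 h2
    cases f2 with
    | zero =>
      have hkl : k > l := by omega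
      simp [mm2Dfs]
      omega
    | succ f2 =>
      simp only [mm2Dfs]
      by_cases hke : k = l
      · simp [hke]
      · by_cases hgt : k > l
        · simp [hke, hgt]
        · simp only [if_neg hke, if_neg hgt]
          have hlt : k < l := by omega
          rw [ih f2 (k+1) l (by omega) (by omega)]
          rw [ih f2 (k+2) l (by omega) (by omega)]
          apply PySem.List.foldl_congr_mem
          intro acc x hx
          rw [PySem.List.mem_pyRange_one] at hx
          rw [ih f2 (k+1) (x-1) (by omega) (by omega)]
          rw [ih f2 (x+1) l (by omega) (by omega)]
theorem mm2Dfs_eq_D (arr : List Int) (f : Nat) (k l : Int) (h : l - k < (f : Int)) :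
    mm2Dfs arr f k l = mm2D arr k l := by
  apply mm2Dfs_fuel arr f _ k l h; omega

theorem mm2D_rec (arr : List Int) (k l : Int) (hkl : k < l) :
    mm2D arr k l =
      (PySem.List.pyRange (k + 2) (l + 1) 1).foldl
        (fun ans i =>
          if mm2Idx arr i = mm2Idx arr k then
            min ans (mm2D arr (k + 1) (i - 1) + mm2D arr (i + 1) l)
          else ans)
        (if mm2Idx arr k = mm2Idx arr (k + 1) then
           min (min (l - k + 1) (mm2D arr (k + 1) l + 1)) (mm2D arr (k + 2) l + 1)
         else min (l - k + 1) (mm2D arr (k + 1) l + 1)) := by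
  have hm : ((l - k).toNat : Int) = l - k := by omega
  conv_lhs => rw [mm2D]
  obtain ⟨m, hmeq⟩ : ∃ m, (l - k).toNat = m := ⟨_, rfl⟩
  rw [hmeq]
  have hmi : (m : Int) = l - k := by omega
  simp only [mm2Dfs, if_neg (by omega : ¬ k = l), if_neg (by omega : ¬ k > l)]
  rw [mm2Dfs_eq_D arr m (k+1) l (by omega), mm2Dfs_eq_D arr m (k+2) l (by omega)]
  apply PySem.List.foldl_congr_mem
  intro acc x hx
  rw [PySem.List.mem_pyRange_one] at hx
  rw [mm2Dfs_eq_D arr m (k+1) (x-1) (by omega), mm2Dfs_eq_D arr m (x+1) l (by omega)]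
theorem mm2_cell (arr : List Int) (dp : PySem.Dict (Int × Int) Int) (t k l : Int)
    (ht : t = l - k + 1)
    (hk : 0 ≤ k) (hl : l < (arr.length : Int)) (hkl : k < l)
    (H : ∀ k' l' : Int, 0 ≤ k' → l' < (arr.length : Int) → l' - k' < l - k →
          mm2Get dp k' l' = mm2D arr k' l') :
    (PySem.List.pyRange (k + 2) (l + 1) 1).foldl
        (fun best i =>
          if mm2At arr i = mm2At arr k then
            min best (mm2Get dp (k + 1) (i - 1) + mm2Get dp (i + 1) l)
          else best)
        (if mm2At arr k = mm2At arr (k + 1) then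
           min (min t (mm2Get dp (k + 1) l + 1)) (mm2Get dp (k + 2) l + 1)
         else min t (mm2Get dp (k + 1) l + 1)) = mm2D arr k l := by
  subst ht
  rw [H (k+1) l (by omega) (by omega) (by omega)]
  rw [H (k+2) l (by omega) (by omega) (by omega)]
  rw [show mm2At = mm2Idx from rfl]
  refine Eq.trans ?_ (mm2D_rec arr k l hkl).symm
  apply PySem.List.foldl_congr_mem
  intro acc x hx
  rw [PySem.List.mem_pyRange_one] at hx
  rw [H (k+1) (x-1) (by omega) (by omega) (by omega),
      H (x+1) l (by omega) (by omega) (by omega)]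

theorem mm2D_diag (arr : List Int) (k : Int) : mm2D arr k k = 1 := by
  simp [mm2D, mm2Dfs]

theorem mm2D_of_gt (arr : List Int) (k l : Int) (h : k > l) : mm2D arr k l = 0 := by
  have : (l - k).toNat = 0 := by omega
  rw [mm2D, this]
  simp only [mm2Dfs, if_neg (by omega : ¬ k = l), if_pos h]

-- B's inner-loop body, named for the proofs (definitionally the lambda in minimumMoves2_alt)
def mm2Step (arr : List Int) (t : Int) (dp : PySem.Dict (Int × Int) Int) (k : Int) :
    PySem.Dict (Int × Int) Int :=
  let l := k + t - 1
  let best := t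
  let best := min best (mm2Get dp (k + 1) l + 1)
  let best := if mm2At arr k = mm2At arr (k + 1) then
                min best (mm2Get dp (k + 2) l + 1) else best
  let best := (PySem.List.pyRange (k + 2) (l + 1) 1).foldl
    (fun best i =>
      if mm2At arr i = mm2At arr k then
        min best (mm2Get dp (k + 1) (i - 1) + mm2Get dp (i + 1) l)
      else best) best
  dp.insert (k, l) best

def mm2CharIn (arr : List Int) (dp : PySem.Dict (Int × Int) Int) (t K : Int) : Prop :=
  ∀ k l : Int, dp.get? (k, l) =
    if 0 ≤ k ∧ k < l ∧ l < (arr.length : Int) ∧ (l - k + 1 < t ∨ (l - k + 1 = t ∧ k < K)) then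
      some (mm2D arr k l) else none

-- the table agrees with mm2D on every cell the next computation may consult
theorem mm2CharIn_get (arr : List Int) (dp : PySem.Dict (Int × Int) Int) (t K : Int)
    (h : mm2CharIn arr dp t K) (k l : Int) (hk : 0 ≤ k) (hl : l < (arr.length : Int))
    (hlen : l - k + 1 < t) : mm2Get dp k l = mm2D arr k l := by
  rw [mm2Get, PySem.Dict.getD_eq_get?_getD, h k l]
  by_cases hkl : k < l
  · simp [hk, hkl, hl, hlen]
  · by_cases hke : k = l
    · subst hke; simp [mm2D_diag]
    · rw [if_neg (by omega)]
      simp only [Option.getD_none]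
      rw [if_neg (by omega), mm2D_of_gt arr k l (by omega)]

theorem mm2_step_char (arr : List Int) (t K : Int) (dp : PySem.Dict (Int × Int) Int)
    (ht2 : 2 ≤ t) (hK : 0 ≤ K) (hKlt : K < (arr.length : Int) - t + 1)
    (h : mm2CharIn arr dp t K) :
    mm2CharIn arr (mm2Step arr t dp K) t (K + 1) := by
  have hbest : (PySem.List.pyRange (K + 2) (K + t - 1 + 1) 1).foldl
      (fun best i =>
        if mm2At arr i = mm2At arr K then
          min best (mm2Get dp (K + 1) (i - 1) + mm2Get dp (i + 1) (K + t - 1))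
        else best)
      (if mm2At arr K = mm2At arr (K + 1) then
         min (min t (mm2Get dp (K + 1) (K + t - 1) + 1)) (mm2Get dp (K + 2) (K + t - 1) + 1)
       else min t (mm2Get dp (K + 1) (K + t - 1) + 1)) = mm2D arr K (K + t - 1) := by
    apply mm2_cell arr dp t K (K + t - 1) (by omega) hK (by omega) (by omega)
    intro k' l' hk' hl' hlen'
    exact mm2CharIn_get arr dp t K h k' l' hk' hl' (by omega)
  intro k l
  show (dp.insert (K, K + t - 1) _).get? (k, l) = _
  rw [PySem.Dict.get?_insert]
  by_cases heq : (k, l) = (K, K + t - 1)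
  · rw [if_pos heq]
    obtain ⟨hk1, hl1⟩ := Prod.mk.injEq .. ▸ heq
    rw [hbest, if_pos (by constructor <;> omega)]
    rw [hk1, hl1]
  · rw [if_neg heq]
    rw [h k l]
    have hne : k ≠ K ∨ l ≠ K + t - 1 := by
      by_contra hc
      push Not at hc
      exact heq (by rw [hc.1, hc.2])
    apply if_congr _ rfl rfl
    constructor <;> (intro ⟨a, b, c, d⟩; refine ⟨a, b, c, ?_⟩; omega)

theorem mm2_inner (arr : List Int) (t : Int) (ht2 : 2 ≤ t) :
    ∀ fuel : Nat, ∀ K : Int, ∀ dp, 0 ≤ K → K ≤ (arr.length : Int) - t + 1 →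
      ((arr.length : Int) - t + 1 - K).toNat = fuel →
      mm2CharIn arr dp t K →
      mm2CharIn arr
        ((PySem.List.pyRange K ((arr.length : Int) - t + 1) 1).foldl (mm2Step arr t) dp)
        t ((arr.length : Int) - t + 1) := by
  intro fuel
  induction fuel with
  | zero =>
    intro K dp hK0 hKle hfuel h
    have hKeq : K = (arr.length : Int) - t + 1 := by omega
    rw [PySem.List.pyRange_one]
    rw [show ((arr.length : Int) - t + 1 - K).toNat = 0 from hfuel]
    simpa [List.range_zero] using hKeq ▸ h
  | succ fuel ih =>
    intro K dp hK0 hKle hfuel h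
    rw [PySem.List.pyRange_one_cons (by omega)]
    rw [List.foldl_cons]
    exact ih (K + 1) (mm2Step arr t dp K) (by omega) (by omega) (by omega)
      (mm2_step_char arr t K dp ht2 hK0 (by omega) h)

def mm2Char (arr : List Int) (dp : PySem.Dict (Int × Int) Int) (T : Int) : Prop :=
  ∀ k l : Int, dp.get? (k, l) =
    if 0 ≤ k ∧ k < l ∧ l < (arr.length : Int) ∧ l - k + 1 ≤ T then some (mm2D arr k l) else none

theorem mm2Char_to_In (arr : List Int) (dp : PySem.Dict (Int × Int) Int) (t : Int)
    (h : mm2Char arr dp (t - 1)) : mm2CharIn arr dp t 0 := by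
  intro k l
  rw [h k l]
  exact if_congr (by constructor <;> (intro ⟨a, b, c, d⟩; exact ⟨a, b, c, by omega⟩)) rfl rfl

theorem mm2In_to_Char (arr : List Int) (dp : PySem.Dict (Int × Int) Int) (t : Int)
    (h : mm2CharIn arr dp t ((arr.length : Int) - t + 1)) : mm2Char arr dp t := by
  intro k l
  rw [h k l]
  exact if_congr (by constructor <;> (intro ⟨a, b, c, d⟩; exact ⟨a, b, c, by omega⟩)) rfl rfl

theorem mm2_outer (arr : List Int) :
    ∀ fuel : Nat, ∀ t : Int, ∀ dp, 2 ≤ t → t ≤ (arr.length : Int) + 1 →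
      ((arr.length : Int) + 1 - t).toNat = fuel →
      mm2Char arr dp (t - 1) →
      mm2Char arr
        ((PySem.List.pyRange t ((arr.length : Int) + 1) 1).foldl (fun dp t =>
          (PySem.List.pyRange 0 ((arr.length : Int) - t + 1) 1).foldl (mm2Step arr t) dp) dp)
        (arr.length : Int) := by
  intro fuel
  induction fuel with
  | zero =>
    intro t dp ht2 htn hfuel h
    have hteq : t = (arr.length : Int) + 1 := by omega
    rw [PySem.List.pyRange_one, show ((arr.length : Int) + 1 - t).toNat = 0 from hfuel]
    simpa [List.range_zero] using (by omega : t - 1 = (arr.length : Int)) ▸ h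
  | succ fuel ih =>
    intro t dp ht2 htn hfuel h
    rw [PySem.List.pyRange_one_cons (by omega), List.foldl_cons]
    apply ih (t + 1) _ (by omega) (by omega) (by omega)
    have := mm2_inner arr t ht2 ((arr.length : Int) - t + 1).toNat 0 dp le_rfl (by omega)
      (by omega) (mm2Char_to_In arr dp t h)
    have hc := mm2In_to_Char arr _ t this
    simpa using hc

-- ===== VERDICT (by name: the statement is the Claim_ definition above) =====
theorem minimumMoves2_spec : Claim_equal_minimumMoves2 := by
  intro arr _
  unfold Spec_minimumMoves2
  cases arr with
  | nil => rfl
  | cons a as =>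
    set arr := a :: as with harr
    have hn1 : 1 ≤ (arr.length : Int) := by simp [harr]
    show mm2Dfs arr arr.length 0 ((arr.length : Int) - 1) =
      mm2Get ((PySem.List.pyRange 2 ((arr.length : Int) + 1) 1).foldl (fun dp t =>
        (PySem.List.pyRange 0 ((arr.length : Int) - t + 1) 1).foldl (mm2Step arr t) dp)
        PySem.Dict.empty) 0 ((arr.length : Int) - 1)
    have hbase : mm2Char arr PySem.Dict.empty 1 := by
      intro k l
      rw [PySem.Dict.get?_empty, if_neg (by omega)]
    have hchar := mm2_outer arr (((arr.length : Int) + 1 - 2).toNat) 2 PySem.Dict.empty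
      le_rfl (by omega) rfl (by simpa using hbase)
    rw [mm2Get, PySem.Dict.getD_eq_get?_getD, hchar 0 ((arr.length : Int) - 1)]
    by_cases h2 : 2 ≤ (arr.length : Int)
    · rw [if_pos ⟨le_rfl, by omega, by omega, by omega⟩]
      simp only [Option.getD_some]
      exact mm2Dfs_eq_D arr arr.length 0 ((arr.length : Int) - 1) (by omega)
    · rw [if_neg (by omega), Option.getD_none, if_pos (by omega : (0 : Int) = (arr.length : Int) - 1)]
      rw [mm2Dfs_eq_D arr arr.length 0 ((arr.length : Int) - 1) (by omega)]
      rw [show (arr.length : Int) - 1 = 0 by omega, mm2D_diag]
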